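-- pv_equiv track=rewrite | github.com/EmanuelML64/ayed-2025-tps | TP3/# TP 3 Ejercicio 5.py | butacas_contiguas
-- ===== SOURCE A (Python) =====
-- def butacas_contiguas(sala:list[list])->tuple:
--     '''
--     Busca la secuencia más larga de butacas contiguas libres en una misma fila.
--     Precondición: sala debe ser una matriz rectangular de 0 y 1.
--     Poscondición: Retorna una tupla (longitud, (fila, columna_inicio)).
--     Si no hay butacas libres, retorna (0, (-1, -1)).
--     '''
--     mejor = (0, (-1, -1))
--     for i, fila in enumerate(sala):
--         cont = 0
--         inicio = 0
--         for j, b in enumerate(fila + [1]):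
--             if b == 0:
--                 cont += 1
--             else:
--                 if cont > mejor[0]:
--                     mejor = (cont, (i, inicio))
--                 cont = 0
--                 inicio = j + 1
--     return mejor
-- ===== SOURCE B (Python) =====
-- def butacas_contiguas(sala: list[list]) -> tuple:
--     '''Walls approach: per row, list the occupied-seat indices bracketed by -1 and
--     len(fila); each free run is the gap between consecutive walls.'''
--     mejor = (0, (-1, -1))
--     for i, fila in enumerate(sala):
--         walls = [-1] + [j for j, b in enumerate(fila) if b != 0] + [len(fila)]
--         for izq, der in zip(walls, walls[1:]):
--             largo = der - izq - 1
--             if largo > mejor[0]: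
--                 mejor = (largo, (i, izq + 1))
--     return mejor
-- ===== Notes on version B (the rewrite author's own statement) =====
-- stated objective: alternative
-- what changed: B builds, per row, the list of occupied-seat indices bracketed by -1 and len(row) ('walls') and derives each free run as the gap between consecutive walls via zip, instead of A's per-cell running counter with an appended sentinel.
import Mathlib
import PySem

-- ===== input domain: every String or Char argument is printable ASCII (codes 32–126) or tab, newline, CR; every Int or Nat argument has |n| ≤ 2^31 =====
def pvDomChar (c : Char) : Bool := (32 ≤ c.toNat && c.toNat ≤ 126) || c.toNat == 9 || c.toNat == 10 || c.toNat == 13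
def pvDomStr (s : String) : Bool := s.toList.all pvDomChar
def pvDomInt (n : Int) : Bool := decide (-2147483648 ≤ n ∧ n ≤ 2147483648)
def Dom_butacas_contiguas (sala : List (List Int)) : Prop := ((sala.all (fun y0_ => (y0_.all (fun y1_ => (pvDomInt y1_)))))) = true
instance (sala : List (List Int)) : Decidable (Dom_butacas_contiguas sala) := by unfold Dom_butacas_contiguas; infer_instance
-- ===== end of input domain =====

-- B lists each row's occupied-seat indices bracketed by -1 and the row length and
-- reads free runs off consecutive-wall gaps, instead of A's per-cell counter with
-- an appended sentinel; same cost, different decomposition (objective: alternative).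


-- ===== PORT A =====
-- inner for-loop of A over `fila + [1]`: state (j, cont, inicio, mejor)
def pvAinner (i : Int) (cells : List Int) (j cont inicio : Int)
    (mejor : Int × (Int × Int)) : Int × (Int × Int) :=
  match cells with
  | [] => mejor
  | b :: rest =>
    if b == 0 then
      pvAinner i rest (j + 1) (cont + 1) inicio mejor
    else
      pvAinner i rest (j + 1) 0 (j + 1)
        (if cont > mejor.1 then (cont, (i, inicio)) else mejor)

-- outer for-loop of A over `enumerate(sala)`
def pvAouter (i : Int) (rows : List (List Int)) (mejor : Int × (Int × Int)) :
    Int × (Int × Int) :=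
  match rows with
  | [] => mejor
  | fila :: rest => pvAouter (i + 1) rest (pvAinner i (fila ++ [1]) 0 0 0 mejor)

def butacas_contiguas (sala : List (List Int)) : Int × (Int × Int) :=
  pvAouter 0 sala (0, (-1, -1))

-- ===== PORT B =====
-- `[j for j, b in enumerate(fila) if b != 0]`, tracking the index j
def pvNZidx (j : Int) (xs : List Int) : List Int :=
  match xs with
  | [] => []
  | b :: rest => if b ≠ 0 then j :: pvNZidx (j + 1) rest else pvNZidx (j + 1) rest

-- `walls = [-1] + [...] + [len(fila)]`
def pvWalls (fila : List Int) : List Int :=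
  -1 :: (pvNZidx 0 fila ++ [(fila.length : Int)])

-- inner for-loop of B over `zip(walls, walls[1:])`
def pvBpair (i : Int) (ps : List (Int × Int)) (mejor : Int × (Int × Int)) :
    Int × (Int × Int) :=
  match ps with
  | [] => mejor
  | (izq, der) :: rest =>
    let largo := der - izq - 1
    pvBpair i rest (if largo > mejor.1 then (largo, (i, izq + 1)) else mejor)

-- outer for-loop of B over `enumerate(sala)`
def pvBouter (i : Int) (rows : List (List Int)) (mejor : Int × (Int × Int)) :
    Int × (Int × Int) :=
  match rows with
  | [] => mejor
  | fila :: rest =>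
      pvBouter (i + 1) rest
        (pvBpair i ((pvWalls fila).zip ((pvWalls fila).drop 1)) mejor)

def butacas_contiguas_alt (sala : List (List Int)) : Int × (Int × Int) :=
  pvBouter 0 sala (0, (-1, -1))

-- ===== PRECONDITION & SPEC =====
def Spec_butacas_contiguas (sala : List (List Int)) (out : Int × (Int × Int)) : Prop := out = butacas_contiguas_alt sala
instance (sala : List (List Int)) (out : Int × (Int × Int)) : Decidable (Spec_butacas_contiguas sala out) := by unfold Spec_butacas_contiguas; infer_instance

-- ===== CLAIM (what is proved, stated in full; the proofs are below) =====
def Claim_equal_butacas_contiguas : Prop := ∀ (sala : List (List Int)), Dom_butacas_contiguas sala → Spec_butacas_contiguas sala (butacas_contiguas sala)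

-- ===== LEMMAS AND PROOFS =====

-- B's pair loop keeps 0 ≤ mejor.1
theorem pvBpair_fst_nonneg (i : Int) (ps : List (Int × Int)) (mejor : Int × (Int × Int))
    (hm : 0 ≤ mejor.1) : 0 ≤ (pvBpair i ps mejor).1 := by
  induction ps generalizing mejor with
  | nil => simpa [pvBpair] using hm
  | cons p rest ih =>
    obtain ⟨izq, der⟩ := p
    simp only [pvBpair]
    apply ih
    split
    · rename_i h; simp only; omega
    · exact hm

-- main per-row lemma: A's sentinel scan, with cont zeros already counted from
-- position j - cont, equals B's pair loop over the remaining walls (first wall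
-- pinned at j - cont - 1).
theorem row_eq (i : Int) (fila : List Int) (j cont : Int) (mejor : Int × (Int × Int))
    (hm : 0 ≤ mejor.1) :
    pvAinner i (fila ++ [1]) j cont (j - cont) mejor
      = pvBpair i
          (((j - cont - 1) :: (pvNZidx j fila ++ [j + (fila.length : Int)])).zip
            (pvNZidx j fila ++ [j + (fila.length : Int)])) mejor := by
  induction fila generalizing j cont mejor with
  | nil =>
    simp only [List.nil_append, pvAinner, List.length_nil, Int.natCast_zero, add_zero,
      pvNZidx, List.zip_cons_cons, List.zip_nil_right, pvBpair]
    have h1 : (1 : Int) ≠ 0 := by norm_num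
    have : j - (j - cont - 1) - 1 = cont := by ring
    simp [this]
  | cons x xs ih =>
    by_cases hx : x = 0
    · subst hx
      have hA : pvAinner i (((0:Int) :: xs) ++ [1]) j cont (j - cont) mejor
          = pvAinner i (xs ++ [1]) (j + 1) (cont + 1) ((j + 1) - (cont + 1)) mejor := by
        simp only [List.cons_append, pvAinner, beq_self_eq_true, if_pos]
        congr 1; ring
      rw [hA, ih (j + 1) (cont + 1) mejor hm]
      have e1 : j + 1 - (cont + 1) - 1 = j - cont - 1 := by ring
      have e2 : pvNZidx j ((0:Int) :: xs) = pvNZidx (j + 1) xs := by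
        simp [pvNZidx]
      have e3 : j + (((0:Int) :: xs).length : Int) = (j + 1) + (xs.length : Int) := by
        push_cast [List.length_cons]; ring
      rw [e1, e2, e3]
    · have hA : pvAinner i ((x :: xs) ++ [1]) j cont (j - cont) mejor
          = pvAinner i (xs ++ [1]) (j + 1) 0 ((j + 1) - 0)
              (if cont > mejor.1 then (cont, (i, j - cont)) else mejor) := by
        simp only [List.cons_append, pvAinner, beq_iff_eq, hx, if_false]
        norm_num
      set mejor' := if cont > mejor.1 then (cont, (i, j - cont)) else mejor with hmej
      have hm' : 0 ≤ mejor'.1 := by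
        rw [hmej]; split
        · simp only; omega
        · exact hm
      rw [hA, ih (j + 1) 0 mejor' hm']
      have e2 : pvNZidx j (x :: xs) = j :: pvNZidx (j + 1) xs := by
        simp [pvNZidx, hx]
      have e3 : j + (((x :: xs)).length : Int) = (j + 1) + (xs.length : Int) := by
        push_cast [List.length_cons]; ring
      rw [e2, e3]
      simp only [List.cons_append, List.zip_cons_cons, pvBpair]
      have e4 : j - (j - cont - 1) - 1 = cont := by ring
      have e5 : j - cont - 1 + 1 = j - cont := by ring
      rw [e4, e5, ← hmej]
      norm_num

-- outer loops agree, carrying 0 ≤ mejor.1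
theorem outer_eq (sala : List (List Int)) (i : Int) (mejor : Int × (Int × Int))
    (hm : 0 ≤ mejor.1) :
    pvAouter i sala mejor = pvBouter i sala mejor := by
  induction sala generalizing i mejor with
  | nil => rfl
  | cons fila rest ih =>
    have h0 : (0 : Int) - 0 = 0 := by ring
    have hr := row_eq i fila 0 0 mejor hm
    rw [h0] at hr
    rw [pvAouter, pvBouter, hr]
    have hw : ((pvWalls fila).zip ((pvWalls fila).drop 1))
        = (((0:Int) - 1) :: (pvNZidx 0 fila ++ [(0:Int) + (fila.length : Int)])).zip
            (pvNZidx 0 fila ++ [(0:Int) + (fila.length : Int)]) := by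
      norm_num [pvWalls]
    rw [← hw]
    exact ih (i + 1) _ (pvBpair_fst_nonneg i _ mejor hm)

-- ===== VERDICT (by name: the statement is the Claim_ definition above) =====
theorem butacas_contiguas_spec : Claim_equal_butacas_contiguas := by
  intro sala _
  show butacas_contiguas sala = butacas_contiguas_alt sala
  exact outer_eq sala 0 (0, (-1, -1)) (by norm_num)
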